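-- pv_equiv track=rewrite | github.com/goldsergeant/Algorithm-problem-solving | 프로그래머스/4/62050. 지형 이동/지형 이동.py | solution
-- ===== SOURCE A (Python) =====
-- def solution(land, height):
--     def dfs(r, c, num):
--         zone[r][c] = num
--         for dr, dc in (0, 1), (0, -1), (1, 0), (-1, 0),:
--             nr, nc = r + dr, c + dc
--             if 0 <= nr < len(land) and 0 <= nc < len(land) and zone[nr][nc] == 0 and abs(
--                     land[r][c] - land[nr][nc]) <= height:
--                 dfs(nr, nc, num)
--
--     def find(x):
--         if parent_zone[x]!=x:
--             parent_zone[x]=find(parent_zone[x])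
--         return parent_zone[x]
--
--     def union(a,b):
--         a=find(a)
--         b=find(b)
--         if a>b:
--             parent_zone[a]=b
--         else:
--             parent_zone[b]=a
--
--
--     zone = [[0 for _ in range(len(land))] for _ in range(len(land))]
--     edges = []
--     cur = 1
--     answer=0
--     for i in range(len(land)):
--         for j in range(len(land)):
--             if zone[i][j] == 0:
--                 dfs(i, j, cur)
--                 cur += 1
--
--     parent_zone=[i for i in range(cur)]
--
--     for i in range(len(land)):
--         for j in range(len(land)):
--             for dr, dc in (0, 1), (0, -1), (1, 0), (-1, 0),:
--                 nr, nc = i + dr, j + dc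
--                 if 0 <= nr < len(land) and 0 <= nc < len(land) and zone[i][j] != zone[nr][nc]:
--                     points = sorted([(nr, nc), (i, j)])
--                     r1, c1 = points[0]
--                     r2, c2 = points[1]
--                     edges.append((r1, c1, r2, c2, abs(land[i][j] - land[nr][nc])))
--
--     edges.sort(key=lambda x:x[4])
--
--     for r1,c1,r2,c2,cost in edges:
--         a_zone=zone[r1][c1]
--         b_zone=zone[r2][c2]
--         if find(a_zone)!=find(b_zone):
--             union(a_zone,b_zone)
--             answer+=cost
--     return answer
-- ===== SOURCE B (Python) =====
-- def solution(land, height):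
--     n = len(land)
--     zone = [[0] * n for _ in range(n)]
--
--     def fill(r, c, num):
--         zone[r][c] = num
--         for nr, nc in ((r, c + 1), (r, c - 1), (r + 1, c), (r - 1, c)):
--             if 0 <= nr < n and 0 <= nc < n and zone[nr][nc] == 0 and abs(land[r][c] - land[nr][nc]) <= height:
--                 fill(nr, nc, num)
--
--     cur = 1
--     for i in range(n):
--         for j in range(n):
--             if zone[i][j] == 0:
--                 fill(i, j, cur)
--                 cur += 1
--
--     edges = []
--     for i in range(n):
--         for j in range(n):
--             for nr, nc in ((i, j + 1), (i, j - 1), (i + 1, j), (i - 1, j)):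
--                 if 0 <= nr < n and 0 <= nc < n and zone[i][j] != zone[nr][nc]:
--                     edges.append((abs(land[i][j] - land[nr][nc]), zone[i][j], zone[nr][nc]))
--     edges.sort(key=lambda e: e[0])
--
--     # Kruskal without a union-find: partition kept as an eager label array,
--     # merging re-labels one class in a single pass.
--     label = list(range(cur))
--     total = 0
--     for cost, za, zb in edges:
--         la, lb = label[za], label[zb]
--         if la != lb:
--             total += cost
--             label = [lb if v == la else v for v in label]
--     return total
-- ===== Notes on version B (the rewrite author's own statement) =====
-- stated objective: alternative
-- what changed: The Kruskal phase drops the recursive path-compressing union-find over zone ids and instead keeps the partition as an eager label array merged by a single relabelling pass, and edges are stored directly as (cost, zone, zone) triples instead of endpoint-sorted coordinate 5-tuples whose zones are re-looked-up later.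
-- outside the precondition, e.g. on solution([[]], 0): A returns 0, B returns 0
import Mathlib
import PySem

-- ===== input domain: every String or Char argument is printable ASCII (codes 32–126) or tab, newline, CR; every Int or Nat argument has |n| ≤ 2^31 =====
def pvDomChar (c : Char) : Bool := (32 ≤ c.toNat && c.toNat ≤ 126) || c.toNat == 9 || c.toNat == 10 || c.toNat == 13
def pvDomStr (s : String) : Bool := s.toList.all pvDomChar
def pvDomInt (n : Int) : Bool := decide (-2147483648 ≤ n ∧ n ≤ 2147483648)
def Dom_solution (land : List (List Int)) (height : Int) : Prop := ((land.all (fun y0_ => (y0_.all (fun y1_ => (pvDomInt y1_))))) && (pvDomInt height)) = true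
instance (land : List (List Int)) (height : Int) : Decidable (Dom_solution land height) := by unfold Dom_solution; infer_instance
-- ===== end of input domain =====

-- Port A: recursive DFS zone labels + Kruskal over a recursive path-compressing union-find; B keeps the labelling but runs Kruskal on (cost, zone, zone) edges with an eager relabelling partition array instead of a union-find (alternative structure, same cost).
-- ===== PORT A =====
-- shared cell access helpers (ports of zone[r][c] read/write, used by both ports)
def cellGet (m : List (List Int)) (r c : Int) : Int :=
  PySem.List.pyGetD (PySem.List.pyGetD m r []) c 0

def cellSet (m : List (List Int)) (r c v : Int) : List (List Int) :=
  PySem.List.pySetD m r (PySem.List.pySetD (PySem.List.pyGetD m r []) c v)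

-- ===== PORT A =====
def dirsA : List (Int × Int) := [(0, 1), (0, -1), (1, 0), (-1, 0)]

def dfsA (land : List (List Int)) (height num : Int) :
    Nat → List (List Int) → Int → Int → List (List Int)
  | 0, zone, _, _ => zone
  | fuel + 1, zone, r, c =>
    let n : Int := land.length
    let zone1 := cellSet zone r c num
    dirsA.foldl (fun z d =>
      let nr := r + d.1
      let nc := c + d.2
      if 0 ≤ nr ∧ nr < n ∧ 0 ≤ nc ∧ nc < n ∧ cellGet z nr nc = 0 ∧
          |cellGet land r c - cellGet land nr nc| ≤ height then
        dfsA land height num fuel z nr nc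
      else z) zone1

def findA : Nat → List Int → Int → List Int × Int
  | 0, p, x => (p, x)
  | fuel + 1, p, x =>
    if PySem.List.pyGetD p x 0 ≠ x then
      let pr := findA fuel p (PySem.List.pyGetD p x 0)
      let p2 := PySem.List.pySetD pr.1 x pr.2
      (p2, PySem.List.pyGetD p2 x 0)
    else (p, PySem.List.pyGetD p x 0)

def unionA (fuel : Nat) (p : List Int) (a b : Int) : List Int :=
  let fa := findA fuel p a
  let fb := findA fuel fa.1 b
  if fb.2 < fa.2 then PySem.List.pySetD fb.1 fa.2 fb.2
  else PySem.List.pySetD fb.1 fb.2 fa.2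

def solution (land : List (List Int)) (height : Int) : Int :=
  let n : Int := land.length
  let zone0 : List (List Int) :=
    (PySem.List.pyRange 0 n 1).map (fun _ => (PySem.List.pyRange 0 n 1).map (fun _ => (0 : Int)))
  let zc : List (List Int) × Int :=
    (PySem.List.pyRange 0 n 1).foldl (fun zc i =>
      (PySem.List.pyRange 0 n 1).foldl (fun (zc : List (List Int) × Int) j =>
        if cellGet zc.1 i j = 0 then
          (dfsA land height zc.2 (land.length * land.length + 1) zc.1 i j, zc.2 + 1)
        else zc) zc) (zone0, 1)
  let zone := zc.1
  let cur := zc.2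
  let edges0 : List (Int × Int × Int × Int × Int) :=
    (PySem.List.pyRange 0 n 1).foldl (fun es i =>
      (PySem.List.pyRange 0 n 1).foldl (fun es j =>
        dirsA.foldl (fun (es : List (Int × Int × Int × Int × Int)) d =>
          let nr := i + d.1
          let nc := j + d.2
          if 0 ≤ nr ∧ nr < n ∧ 0 ≤ nc ∧ nc < n ∧ cellGet zone i j ≠ cellGet zone nr nc then
            let points := PySem.List.sorted2 [(nr, nc), (i, j)] Prod.fst Prod.snd false
            let q0 := PySem.List.pyGetD points 0 (0, 0)
            let q1 := PySem.List.pyGetD points 1 (0, 0)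
            es ++ [(q0.1, q0.2, q1.1, q1.2, |cellGet land i j - cellGet land nr nc|)]
          else es) es) es) []
  let edges := PySem.List.sorted edges0 (fun e => e.2.2.2.2) false
  let parent0 : List Int := (PySem.List.pyRange 0 cur 1).map (fun i => i)
  let res : List Int × Int :=
    edges.foldl (fun (st : List Int × Int) e =>
      let az := cellGet zone e.1 e.2.1
      let bz := cellGet zone e.2.2.1 e.2.2.2.1
      let fa := findA (st.1.length + 1) st.1 az
      let fb := findA (fa.1.length + 1) fa.1 bz
      if fa.2 ≠ fb.2 then (unionA (fb.1.length + 1) fb.1 az bz, st.2 + e.2.2.2.2)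
      else (fb.1, st.2)) (parent0, 0)
  res.2

-- ===== PORT B =====
def nbrsB (r c : Int) : List (Int × Int) := [(r, c + 1), (r, c - 1), (r + 1, c), (r - 1, c)]

def fillB (land : List (List Int)) (height num : Int) :
    Nat → List (List Int) → Int → Int → List (List Int)
  | 0, zone, _, _ => zone
  | fuel + 1, zone, r, c =>
    let n : Int := land.length
    let zone1 := cellSet zone r c num
    (nbrsB r c).foldl (fun z q =>
      if 0 ≤ q.1 ∧ q.1 < n ∧ 0 ≤ q.2 ∧ q.2 < n ∧ cellGet z q.1 q.2 = 0 ∧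
          |cellGet land r c - cellGet land q.1 q.2| ≤ height then
        fillB land height num fuel z q.1 q.2
      else z) zone1

def solution_alt (land : List (List Int)) (height : Int) : Int :=
  let n : Int := land.length
  let zone0 : List (List Int) :=
    (PySem.List.pyRange 0 n 1).map (fun _ => PySem.List.pyRepeat [(0 : Int)] n)
  let zc : List (List Int) × Int :=
    (PySem.List.pyRange 0 n 1).foldl (fun zc i =>
      (PySem.List.pyRange 0 n 1).foldl (fun (zc : List (List Int) × Int) j =>
        if cellGet zc.1 i j = 0 then
          (fillB land height zc.2 (land.length * land.length + 1) zc.1 i j, zc.2 + 1)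
        else zc) zc) (zone0, 1)
  let zone := zc.1
  let cur := zc.2
  let edges0 : List (Int × Int × Int) :=
    (PySem.List.pyRange 0 n 1).foldl (fun es i =>
      (PySem.List.pyRange 0 n 1).foldl (fun es j =>
        (nbrsB i j).foldl (fun (es : List (Int × Int × Int)) q =>
          if 0 ≤ q.1 ∧ q.1 < n ∧ 0 ≤ q.2 ∧ q.2 < n ∧ cellGet zone i j ≠ cellGet zone q.1 q.2 then
            es ++ [(|cellGet land i j - cellGet land q.1 q.2|, cellGet zone i j, cellGet zone q.1 q.2)]
          else es) es) es) []
  let edges := PySem.List.sorted edges0 (fun e => e.1) false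
  let label0 : List Int := PySem.List.pyRange 0 cur 1
  let res : List Int × Int :=
    edges.foldl (fun (st : List Int × Int) e =>
      let la := PySem.List.pyGetD st.1 e.2.1 0
      let lb := PySem.List.pyGetD st.1 e.2.2 0
      if la ≠ lb then (st.1.map (fun v => if v = la then lb else v), st.2 + e.1)
      else st) (label0, 0)
  res.2


-- ===== PRECONDITION & SPEC =====
-- Pre excludes ragged inputs with a row shorter than len(land): there Python A (and B) raise IndexError,
-- except in degenerate corners such as [[]] where no land cell is ever read and both return 0.
def Pre_solution (land : List (List Int)) (height : Int) : Prop :=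
  ∀ row ∈ land, land.length ≤ row.length

instance (land : List (List Int)) (height : Int) : Decidable (Pre_solution land height) := by
  unfold Pre_solution; infer_instance

def pvWitness_solution : List (List Int) × Int := ([[1, 4], [8, 1]], 2)

def Spec_solution (land : List (List Int)) (height : Int) (out : Int) : Prop :=
  out = solution_alt land height
instance (land : List (List Int)) (height : Int) (out : Int) : Decidable (Spec_solution land height out) := by
  unfold Spec_solution; infer_instance

-- ===== CLAIM (what is proved, stated in full; the proofs are below) =====
def Claim_equal_solution : Prop := ∀ (land : List (List Int)) (height : Int), Dom_solution land height → Pre_solution land height → Spec_solution land height (solution land height)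

-- ===== LEMMAS AND PROOFS =====
theorem dfs_eq (land : List (List Int)) (height num : Int) :
    ∀ (fuel : Nat) (zone : List (List Int)) (r c : Int),
      dfsA land height num fuel zone r c = fillB land height num fuel zone r c := by
  intro fuel
  induction fuel with
  | zero => intro zone r c; rfl
  | succ f ih =>
    intro zone r c
    simp only [dfsA, fillB, dirsA, nbrsB, List.foldl, ih, add_zero, ← sub_eq_add_neg]

def WFp (p : List Int) : Prop :=
  ∀ x : Int, 0 ≤ x → x < p.length → 0 ≤ PySem.List.pyGetD p x 0 ∧ PySem.List.pyGetD p x 0 ≤ x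

def rootGo (p : List Int) : Nat → Int → Int
  | 0, x => x
  | f + 1, x => if PySem.List.pyGetD p x 0 = x then x else rootGo p f (PySem.List.pyGetD p x 0)

def Root (p : List Int) (x : Int) : Int := rootGo p (x.toNat + 1) x

lemma getD_setD (p : List Int) (i j v : Int) (hi0 : 0 ≤ i) (hi : i < p.length) (hj0 : 0 ≤ j) :
    PySem.List.pyGetD (PySem.List.pySetD p i v) j 0 = if j = i then v else PySem.List.pyGetD p j 0 := by
  obtain ⟨n, rfl⟩ : ∃ n : Nat, i = (n : Int) := ⟨i.toNat, (Int.toNat_of_nonneg hi0).symm⟩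
  obtain ⟨m, rfl⟩ : ∃ m : Nat, j = (m : Int) := ⟨j.toNat, (Int.toNat_of_nonneg hj0).symm⟩
  have hn : n < p.length := by exact_mod_cast hi
  rw [PySem.List.pyGetD_pySetD_natCast p n m v 0 hn]
  simp

-- fuel congruence for rootGo
lemma rootGo_congr (p : List Int) (hwf : WFp p) :
    ∀ n : Nat, ∀ x : Int, 0 ≤ x → x < p.length → x.toNat ≤ n →
      ∀ f g : Nat, x.toNat < f → x.toNat < g → rootGo p f x = rootGo p g x := by
  intro n
  induction n with
  | zero =>
    intro x hx0 hxl hxn f g hf hg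
    obtain ⟨f, rfl⟩ := Nat.exists_eq_succ_of_ne_zero (by omega : f ≠ 0)
    obtain ⟨g, rfl⟩ := Nat.exists_eq_succ_of_ne_zero (by omega : g ≠ 0)
    have hx : x = 0 := by omega
    subst hx
    have h := hwf 0 le_rfl hxl
    have : PySem.List.pyGetD p 0 0 = 0 := by omega
    simp [rootGo, this]
  | succ n ih =>
    intro x hx0 hxl hxn f g hf hg
    obtain ⟨f, rfl⟩ := Nat.exists_eq_succ_of_ne_zero (by omega : f ≠ 0)
    obtain ⟨g, rfl⟩ := Nat.exists_eq_succ_of_ne_zero (by omega : g ≠ 0)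
    simp only [rootGo]
    by_cases h : PySem.List.pyGetD p x 0 = x
    · simp [h]
    · simp only [h, if_false]
      have hb := hwf x hx0 hxl
      have hpx0 : 0 ≤ PySem.List.pyGetD p x 0 := hb.1
      have hpxlt : PySem.List.pyGetD p x 0 < x := lt_of_le_of_ne hb.2 h
      have hpxl : PySem.List.pyGetD p x 0 < p.length := lt_trans hpxlt hxl
      have htn : (PySem.List.pyGetD p x 0).toNat < x.toNat := by omega
      exact ih _ hpx0 hpxl (by omega) f g (by omega) (by omega)

lemma rootGo_eq_Root (p : List Int) (hwf : WFp p) (x : Int) (hx0 : 0 ≤ x) (hxl : x < p.length)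
    (f : Nat) (hf : x.toNat < f) : rootGo p f x = Root p x :=
  rootGo_congr p hwf x.toNat x hx0 hxl le_rfl f (x.toNat + 1) hf (by omega)

lemma Root_of_fix (p : List Int) (x : Int) (h : PySem.List.pyGetD p x 0 = x) : Root p x = x := by
  simp [Root, rootGo, h]

lemma Root_step (p : List Int) (hwf : WFp p) (x : Int) (hx0 : 0 ≤ x) (hxl : x < p.length)
    (h : PySem.List.pyGetD p x 0 ≠ x) : Root p x = Root p (PySem.List.pyGetD p x 0) := by
  have hb := hwf x hx0 hxl
  have hpxlt : PySem.List.pyGetD p x 0 < x := lt_of_le_of_ne hb.2 h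
  show rootGo p (x.toNat + 1) x = _
  simp only [rootGo, h, if_false]
  exact rootGo_eq_Root p hwf _ hb.1 (lt_trans hpxlt hxl) x.toNat (by omega)

lemma Root_bounds (p : List Int) (hwf : WFp p) :
    ∀ n : Nat, ∀ x : Int, 0 ≤ x → x < p.length → x.toNat ≤ n →
      0 ≤ Root p x ∧ Root p x ≤ x ∧ PySem.List.pyGetD p (Root p x) 0 = Root p x := by
  intro n
  induction n with
  | zero =>
    intro x hx0 hxl hxn
    have hx : x = 0 := by omega
    subst hx
    have h := hwf 0 le_rfl hxl
    have hfix : PySem.List.pyGetD p 0 0 = 0 := by omega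
    rw [Root_of_fix p 0 hfix]
    exact ⟨le_rfl, le_rfl, hfix⟩
  | succ n ih =>
    intro x hx0 hxl hxn
    by_cases h : PySem.List.pyGetD p x 0 = x
    · rw [Root_of_fix p x h]; exact ⟨hx0, le_rfl, h⟩
    · rw [Root_step p hwf x hx0 hxl h]
      have hb := hwf x hx0 hxl
      have hpxlt : PySem.List.pyGetD p x 0 < x := lt_of_le_of_ne hb.2 h
      have := ih (PySem.List.pyGetD p x 0) hb.1 (lt_trans hpxlt hxl) (by omega)
      exact ⟨this.1, le_trans this.2.1 (le_of_lt hpxlt), this.2.2⟩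

lemma Root_nonneg (p : List Int) (hwf : WFp p) (x : Int) (hx0 : 0 ≤ x) (hxl : x < p.length) :
    0 ≤ Root p x := (Root_bounds p hwf x.toNat x hx0 hxl le_rfl).1
lemma Root_le (p : List Int) (hwf : WFp p) (x : Int) (hx0 : 0 ≤ x) (hxl : x < p.length) :
    Root p x ≤ x := (Root_bounds p hwf x.toNat x hx0 hxl le_rfl).2.1
lemma Root_fix (p : List Int) (hwf : WFp p) (x : Int) (hx0 : 0 ≤ x) (hxl : x < p.length) :
    PySem.List.pyGetD p (Root p x) 0 = Root p x := (Root_bounds p hwf x.toNat x hx0 hxl le_rfl).2.2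

lemma WFp_setD (p : List Int) (hwf : WFp p) (i v : Int) (hv0 : 0 ≤ v) (hvi : v ≤ i)
    (hi0 : 0 ≤ i) (hil : i < p.length) : WFp (PySem.List.pySetD p i v) := by
  intro x hx0 hxl
  rw [PySem.List.length_pySetD] at hxl
  rw [getD_setD p i x v hi0 hil hx0]
  split_ifs with h
  · subst h; exact ⟨hv0, hvi⟩
  · exact hwf x hx0 hxl

-- merge update at a root: Root function collapses the class of rmax into rmin
lemma Root_merge (p : List Int) (hwf : WFp p) (rmin rmax : Int)
    (h0 : 0 ≤ rmin) (hlt : rmin < rmax) (hmax : rmax < p.length)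
    (hfixmax : PySem.List.pyGetD p rmax 0 = rmax) (hfixmin : PySem.List.pyGetD p rmin 0 = rmin) :
    ∀ n : Nat, ∀ x : Int, 0 ≤ x → x < p.length → x.toNat ≤ n →
      Root (PySem.List.pySetD p rmax rmin) x = if Root p x = rmax then rmin else Root p x := by
  have hwf' : WFp (PySem.List.pySetD p rmax rmin) := WFp_setD p hwf rmax rmin h0 (le_of_lt hlt) (by omega) hmax
  have hlen : (PySem.List.pySetD p rmax rmin).length = p.length := PySem.List.length_pySetD ..
  have hget : ∀ j : Int, 0 ≤ j → PySem.List.pyGetD (PySem.List.pySetD p rmax rmin) j 0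
      = if j = rmax then rmin else PySem.List.pyGetD p j 0 := fun j hj =>
    getD_setD p rmax j rmin (le_trans h0 (le_of_lt hlt)) hmax hj
  intro n
  induction n with
  | zero =>
    intro x hx0 hxl hxn
    have hx : x = 0 := by omega
    subst hx
    have hfix0 : PySem.List.pyGetD p 0 0 = 0 := by have := hwf 0 le_rfl hxl; omega
    have hne : (0 : Int) ≠ rmax := by omega
    rw [Root_of_fix _ 0 (by rw [hget 0 le_rfl]; simp [hne, hfix0]), Root_of_fix p 0 hfix0]
    simp [hne]
  | succ n ih =>
    intro x hx0 hxl hxn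
    by_cases hx : x = rmax
    · subst hx
      have hnew : PySem.List.pyGetD (PySem.List.pySetD p x rmin) x 0 = rmin := by
        rw [hget x (by omega)]; simp
      have hne : rmin ≠ x := ne_of_lt hlt
      have hstep := Root_step _ hwf' x (by omega) (by omega : x < (PySem.List.pySetD p x rmin).length) (by rw [hnew]; exact hne)
      rw [hnew] at hstep
      have hminfix : Root (PySem.List.pySetD p x rmin) rmin = rmin := by
        apply Root_of_fix
        rw [hget rmin h0]; simp [hne, hfixmin]
      rw [hstep, hminfix, Root_of_fix p x hfixmax]
      simp
    · have hget' : PySem.List.pyGetD (PySem.List.pySetD p rmax rmin) x 0 = PySem.List.pyGetD p x 0 := by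
        rw [hget x hx0]; simp [hx]
      by_cases h : PySem.List.pyGetD p x 0 = x
      · rw [Root_of_fix _ x (by rw [hget', h]), Root_of_fix p x h]
        simp [hx]
      · have hb := hwf x hx0 hxl
        have hpxlt : PySem.List.pyGetD p x 0 < x := lt_of_le_of_ne hb.2 h
        rw [Root_step _ hwf' x hx0 (by omega) (by rw [hget']; exact h), hget',
            Root_step p hwf x hx0 hxl h]
        exact ih _ hb.1 (by omega) (by omega)

-- path-compression update: Root function unchanged
lemma Root_compress (p : List Int) (hwf : WFp p) (t : Int) (ht0 : 0 ≤ t) (htl : t < p.length) :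
    ∀ n : Nat, ∀ x : Int, 0 ≤ x → x < p.length → x.toNat ≤ n →
      Root (PySem.List.pySetD p t (Root p t)) x = Root p x := by
  set ρ := Root p t with hρ
  have hρ0 : 0 ≤ ρ := Root_nonneg p hwf t ht0 htl
  have hρt : ρ ≤ t := Root_le p hwf t ht0 htl
  have hρfix : PySem.List.pyGetD p ρ 0 = ρ := Root_fix p hwf t ht0 htl
  have hwf' : WFp (PySem.List.pySetD p t ρ) := WFp_setD p hwf t ρ hρ0 hρt ht0 htl
  have hlen : (PySem.List.pySetD p t ρ).length = p.length := PySem.List.length_pySetD ..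
  have hget : ∀ j : Int, 0 ≤ j → PySem.List.pyGetD (PySem.List.pySetD p t ρ) j 0
      = if j = t then ρ else PySem.List.pyGetD p j 0 := fun j hj => getD_setD p t j ρ ht0 htl hj
  intro n
  induction n with
  | zero =>
    intro x hx0 hxl hxn
    have hx : x = 0 := by omega
    subst hx
    have hfix0 : PySem.List.pyGetD p 0 0 = 0 := by have := hwf 0 le_rfl hxl; omega
    by_cases ht : (0 : Int) = t
    · subst ht
      have : ρ = 0 := by omega
      rw [Root_of_fix _ 0 (by rw [hget 0 le_rfl]; simp [this])]
      rw [Root_of_fix p 0 hfix0]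
    · rw [Root_of_fix _ 0 (by rw [hget 0 le_rfl]; simp [ht, hfix0]), Root_of_fix p 0 hfix0]
  | succ n ih =>
    intro x hx0 hxl hxn
    by_cases hx : x = t
    · subst hx
      by_cases hρx : ρ = x
      · rw [Root_of_fix _ x (by rw [hget x hx0]; simp [hρx])]
        omega
      · have hstep := Root_step _ hwf' x hx0 (by omega) (by rw [hget x hx0]; simp [hρx])
        rw [hget x hx0, if_pos rfl] at hstep
        rw [hstep]
        have : Root (PySem.List.pySetD p x ρ) ρ = ρ := by
          apply Root_of_fix
          rw [hget ρ hρ0]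
          simp [hρx, hρfix]
        rw [this]
    · have hget' : PySem.List.pyGetD (PySem.List.pySetD p t ρ) x 0 = PySem.List.pyGetD p x 0 := by
        rw [hget x hx0]; simp [hx]
      by_cases h : PySem.List.pyGetD p x 0 = x
      · rw [Root_of_fix _ x (by rw [hget', h]), Root_of_fix p x h]
      · have hb := hwf x hx0 hxl
        have hpxlt : PySem.List.pyGetD p x 0 < x := lt_of_le_of_ne hb.2 h
        rw [Root_step _ hwf' x hx0 (by omega) (by rw [hget']; exact h), hget',
            Root_step p hwf x hx0 hxl h]
        exact ih _ hb.1 (by omega) (by omega)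

structure FindSpec (p : List Int) (x : Int) (out : List Int × Int) : Prop where
  root : out.2 = Root p x
  len : out.1.length = p.length
  wf : WFp out.1
  roots : ∀ y : Int, 0 ≤ y → y < p.length → Root out.1 y = Root p y

lemma findA_spec (p : List Int) (hwf : WFp p) :
    ∀ n : Nat, ∀ x : Int, 0 ≤ x → x < p.length → x.toNat ≤ n →
      ∀ f : Nat, x.toNat < f → FindSpec p x (findA f p x) := by
  intro n
  induction n with
  | zero =>
    intro x hx0 hxl hxn f hf
    obtain ⟨f, rfl⟩ := Nat.exists_eq_succ_of_ne_zero (by omega : f ≠ 0)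
    have hx : x = 0 := by omega
    subst hx
    have hfix : PySem.List.pyGetD p 0 0 = 0 := by have := hwf 0 le_rfl hxl; omega
    simp only [findA, hfix, ne_eq, not_true_eq_false, if_false]
    exact ⟨by simp [Root_of_fix p 0 hfix], rfl, hwf, fun y _ _ => rfl⟩
  | succ n ih =>
    intro x hx0 hxl hxn f hf
    obtain ⟨f, rfl⟩ := Nat.exists_eq_succ_of_ne_zero (by omega : f ≠ 0)
    by_cases h : PySem.List.pyGetD p x 0 = x
    · simp only [findA, h, ne_eq, not_true_eq_false, if_false]
      exact ⟨by simp [Root_of_fix p x h], rfl, hwf, fun y _ _ => rfl⟩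
    · have hb := hwf x hx0 hxl
      have hpxlt : PySem.List.pyGetD p x 0 < x := lt_of_le_of_ne hb.2 h
      have hpx0 : 0 ≤ PySem.List.pyGetD p x 0 := hb.1
      have hpxl : PySem.List.pyGetD p x 0 < p.length := lt_trans hpxlt hxl
      have hrec := ih (PySem.List.pyGetD p x 0) hpx0 hpxl (by omega) f (by omega)
      simp only [findA, h, ne_eq, not_false_eq_true, if_true]
      set pr := findA f p (PySem.List.pyGetD p x 0) with hpr
      have hroot : pr.2 = Root p x := by
        rw [hrec.root, ← Root_step p hwf x hx0 hxl h]
      have hxl1 : x < pr.1.length := by rw [hrec.len]; exact hxl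
      have hrx : Root pr.1 x = Root p x := hrec.roots x hx0 hxl
      have hp2 : PySem.List.pySetD pr.1 x pr.2 = PySem.List.pySetD pr.1 x (Root pr.1 x) := by
        rw [hroot, hrx]
      have hwf2 : WFp (PySem.List.pySetD pr.1 x pr.2) := by
        rw [hp2]
        exact WFp_setD pr.1 hrec.wf x (Root pr.1 x)
          (Root_nonneg pr.1 hrec.wf x hx0 hxl1) (Root_le pr.1 hrec.wf x hx0 hxl1) hx0 hxl1
      have hget2 : PySem.List.pyGetD (PySem.List.pySetD pr.1 x pr.2) x 0 = pr.2 := by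
        rw [getD_setD pr.1 x x pr.2 hx0 hxl1 hx0]
        simp
      refine ⟨by simpa using hget2.trans hroot, ?_, hwf2, ?_⟩
      · simp [PySem.List.length_pySetD, hrec.len]
      · intro y hy0 hyl
        have hyl1 : y < pr.1.length := by rw [hrec.len]; exact hyl
        calc Root (PySem.List.pySetD pr.1 x pr.2) y
            = Root (PySem.List.pySetD pr.1 x (Root pr.1 x)) y := by rw [hp2]
          _ = Root pr.1 y := Root_compress pr.1 hrec.wf x hx0 hxl1 y.toNat y hy0 hyl1 le_rfl
          _ = Root p y := hrec.roots y hy0 hyl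

lemma unionA_spec (p : List Int) (hwf : WFp p) (a b : Int)
    (ha0 : 0 ≤ a) (hal : a < p.length) (hb0 : 0 ≤ b) (hbl : b < p.length)
    (hne : Root p a ≠ Root p b) (f : Nat) (hf : p.length ≤ f) :
    (unionA f p a b).length = p.length ∧ WFp (unionA f p a b) ∧
      ∀ y : Int, 0 ≤ y → y < p.length →
        Root (unionA f p a b) y =
          if Root p y = max (Root p a) (Root p b) then min (Root p a) (Root p b) else Root p y := by
  have hfa := findA_spec p hwf a.toNat a ha0 hal le_rfl f (by omega)
  set fa := findA f p a with hfadef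
  have hbl1 : b < fa.1.length := by rw [hfa.len]; exact hbl
  have hfb := findA_spec fa.1 hfa.wf b.toNat b hb0 hbl1 le_rfl f (by rw [hfa.len] at hbl1; omega)
  set fb := findA f fa.1 b with hfbdef
  have hlen2 : fb.1.length = p.length := by rw [hfb.len, hfa.len]
  have hra : fa.2 = Root p a := hfa.root
  have hrb : fb.2 = Root p b := by rw [hfb.root, hfa.roots b hb0 hbl]
  have hroots2 : ∀ y : Int, 0 ≤ y → y < p.length → Root fb.1 y = Root p y := fun y hy0 hyl => by
    rw [hfb.roots y hy0 (by rw [hfa.len]; exact hyl), hfa.roots y hy0 hyl]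
  have hra0 : 0 ≤ Root p a := Root_nonneg p hwf a ha0 hal
  have hrb0 : 0 ≤ Root p b := Root_nonneg p hwf b hb0 hbl
  have hral : Root p a < p.length := lt_of_le_of_lt (Root_le p hwf a ha0 hal) hal
  have hrbl : Root p b < p.length := lt_of_le_of_lt (Root_le p hwf b hb0 hbl) hbl
  have hfixa : PySem.List.pyGetD fb.1 (Root p a) 0 = Root p a := by
    have := Root_fix fb.1 hfb.wf a ha0 (by rw [hlen2]; exact hal)
    rwa [hroots2 a ha0 hal] at this
  have hfixb : PySem.List.pyGetD fb.1 (Root p b) 0 = Root p b := by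
    have := Root_fix fb.1 hfb.wf b hb0 (by rw [hlen2]; exact hbl)
    rwa [hroots2 b hb0 hbl] at this
  simp only [unionA]
  rw [← hfadef, ← hfbdef, hra, hrb]
  by_cases hc : Root p b < Root p a
  · rw [if_pos hc]
    have hmax : max (Root p a) (Root p b) = Root p a := max_eq_left (le_of_lt hc)
    have hmin : min (Root p a) (Root p b) = Root p b := min_eq_right (le_of_lt hc)
    refine ⟨by rw [PySem.List.length_pySetD, hlen2], ?_, ?_⟩
    · exact WFp_setD fb.1 hfb.wf (Root p a) (Root p b) hrb0 (le_of_lt hc) hra0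
        (by rw [hlen2]; exact hral)
    · intro y hy0 hyl
      have := Root_merge fb.1 hfb.wf (Root p b) (Root p a) hrb0 hc
        (by rw [hlen2]; exact hral) hfixa hfixb y.toNat y hy0 (by rw [hlen2]; exact hyl) le_rfl
      rw [this, hroots2 y hy0 hyl, hmax, hmin]
  · rw [if_neg hc]
    have hc' : Root p a < Root p b := lt_of_le_of_ne (not_lt.mp hc) hne
    have hmax : max (Root p a) (Root p b) = Root p b := max_eq_right (le_of_lt hc')
    have hmin : min (Root p a) (Root p b) = Root p a := min_eq_left (le_of_lt hc')
    refine ⟨by rw [PySem.List.length_pySetD, hlen2], ?_, ?_⟩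
    · exact WFp_setD fb.1 hfb.wf (Root p b) (Root p a) hra0 (le_of_lt hc') hrb0
        (by rw [hlen2]; exact hrbl)
    · intro y hy0 hyl
      have := Root_merge fb.1 hfb.wf (Root p a) (Root p b) hra0 hc'
        (by rw [hlen2]; exact hrbl) hfixb hfixa y.toNat y hy0 (by rw [hlen2]; exact hyl) le_rfl
      rw [this, hroots2 y hy0 hyl, hmax, hmin]

def ZBound (zone : List (List Int)) (k : Int) : Prop :=
  ∀ row ∈ zone, ∀ v ∈ row, 0 ≤ v ∧ v < k

lemma getD_mem_or_default {α : Type} (xs : List α) (i : Int) (d : α) :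
    PySem.List.pyGetD xs i d = d ∨ PySem.List.pyGetD xs i d ∈ xs := by
  unfold PySem.List.pyGetD
  cases h : PySem.List.pyGet? xs i with
  | none => simp
  | some v => right; simpa using PySem.List.mem_of_pyGet?_eq_some (xs := xs) (i := i) h

lemma mem_pySetD {α : Type} (xs : List α) (i : Int) (v y : α)
    (hy : y ∈ PySem.List.pySetD xs i v) : y ∈ xs ∨ y = v := by
  unfold PySem.List.pySetD PySem.List.pySet? at hy
  cases h : PySem.List.pyIdx? xs.length i with
  | none => rw [h] at hy; simp at hy; exact Or.inl hy
  | some k =>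
    rw [h] at hy
    simp at hy
    rcases List.mem_or_eq_of_mem_set hy with h1 | h1
    · exact Or.inl h1
    · exact Or.inr h1

lemma cellGet_bound (zone : List (List Int)) (k r c : Int) (hk : 0 < k) (h : ZBound zone k) :
    0 ≤ cellGet zone r c ∧ cellGet zone r c < k := by
  unfold cellGet
  rcases getD_mem_or_default zone r ([] : List Int) with hrow | hrow
  · rw [hrow]
    rcases getD_mem_or_default ([] : List Int) c (0 : Int) with hv | hv
    · rw [hv]; omega
    · simp at hv
  · rcases getD_mem_or_default (PySem.List.pyGetD zone r []) c (0 : Int) with hv | hv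
    · rw [hv]; omega
    · exact h _ hrow _ hv

lemma ZBound_cellSet (zone : List (List Int)) (k r c v : Int) (h : ZBound zone k)
    (hv0 : 0 ≤ v) (hvk : v < k) : ZBound (cellSet zone r c v) k := by
  intro row hrow w hw
  unfold cellSet at hrow
  rcases mem_pySetD _ _ _ _ hrow with h1 | h1
  · exact h _ h1 _ hw
  · subst h1
    rcases mem_pySetD _ _ _ _ hw with h2 | h2
    · rcases getD_mem_or_default zone r ([] : List Int) with hr | hr
      · rw [hr] at h2; simp at h2
      · exact h _ hr _ h2
    · subst h2; exact ⟨hv0, hvk⟩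

lemma ZBound_mono (zone : List (List Int)) (k k' : Int) (h : ZBound zone k) (hk : k ≤ k') :
    ZBound zone k' := fun row hr v hv => ⟨(h row hr v hv).1, lt_of_lt_of_le (h row hr v hv).2 hk⟩

lemma foldl_preserve {α β : Type} (P : α → Prop) (f : α → β → α) (l : List β) (init : α)
    (h0 : P init) (hstep : ∀ st x, P st → P (f st x)) : P (l.foldl f init) := by
  induction l generalizing init with
  | nil => exact h0
  | cons x xs ih => exact ih _ (hstep _ _ h0)

lemma ZBound_dfs (land : List (List Int)) (height num k : Int) (hnum0 : 0 ≤ num) (hnumk : num < k) :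
    ∀ (fuel : Nat) (zone : List (List Int)) (r c : Int), ZBound zone k →
      ZBound (dfsA land height num fuel zone r c) k := by
  intro fuel
  induction fuel with
  | zero => intro zone r c h; exact h
  | succ f ih =>
    intro zone r c h
    simp only [dfsA]
    apply foldl_preserve (fun z => ZBound z k)
    · exact ZBound_cellSet zone k r c num h hnum0 hnumk
    · intro st x hst
      dsimp only
      split_ifs with hcond
      · exact ih st _ _ hst
      · exact hst

-- the labeling phase yields bounded zone values and a positive zone count
lemma label_invariant (land : List (List Int)) (height : Int) (rows cols : List Int)
    (zc0 : List (List Int) × Int) (h0 : ZBound zc0.1 zc0.2 ∧ 1 ≤ zc0.2) :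
    ZBound (rows.foldl (fun zc i =>
      cols.foldl (fun (zc : List (List Int) × Int) j =>
        if cellGet zc.1 i j = 0 then
          (dfsA land height zc.2 (land.length * land.length + 1) zc.1 i j, zc.2 + 1)
        else zc) zc) zc0).1
      (rows.foldl (fun zc i =>
      cols.foldl (fun (zc : List (List Int) × Int) j =>
        if cellGet zc.1 i j = 0 then
          (dfsA land height zc.2 (land.length * land.length + 1) zc.1 i j, zc.2 + 1)
        else zc) zc) zc0).2 ∧
    1 ≤ (rows.foldl (fun zc i =>
      cols.foldl (fun (zc : List (List Int) × Int) j =>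
        if cellGet zc.1 i j = 0 then
          (dfsA land height zc.2 (land.length * land.length + 1) zc.1 i j, zc.2 + 1)
        else zc) zc) zc0).2 := by
  refine foldl_preserve (fun (zc : List (List Int) × Int) => ZBound zc.1 zc.2 ∧ 1 ≤ zc.2) _ _ _ h0 ?_
  intro st i hst
  refine foldl_preserve (fun (zc : List (List Int) × Int) => ZBound zc.1 zc.2 ∧ 1 ≤ zc.2) _ _ _ hst ?_
  intro st' j hst'
  dsimp only
  split_ifs with hcond
  · constructor
    · apply ZBound_dfs land height st'.2 (st'.2 + 1) (by omega) (by omega)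
      exact ZBound_mono _ _ _ hst'.1 (by omega)
    · omega
  · exact hst'

def ERel (zone : List (List Int)) (len : Int)
    (e : Int × Int × Int × Int × Int) (t : Int × Int × Int) : Prop :=
  t.1 = e.2.2.2.2 ∧
  ((cellGet zone e.1 e.2.1 = t.2.1 ∧ cellGet zone e.2.2.1 e.2.2.2.1 = t.2.2) ∨
   (cellGet zone e.1 e.2.1 = t.2.2 ∧ cellGet zone e.2.2.1 e.2.2.2.1 = t.2.1)) ∧
  0 ≤ t.2.1 ∧ t.2.1 < len ∧ 0 ≤ t.2.2 ∧ t.2.2 < len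

lemma sorted2_pair (x y : Int × Int) :
    PySem.List.sorted2 [x, y] Prod.fst Prod.snd false = [x, y] ∨
    PySem.List.sorted2 [x, y] Prod.fst Prod.snd false = [y, x] := by
  simp only [PySem.List.sorted2, List.foldl, PySem.List.insertBy]
  split_ifs <;> simp

lemma foldl2_rel {α β γ : Type} (R : β → γ → Prop) (f : List β → α → List β)
    (g : List γ → α → List γ)
    (h : ∀ acc1 acc2 x, List.Forall₂ R acc1 acc2 → List.Forall₂ R (f acc1 x) (g acc2 x)) :
    ∀ (l : List α) (acc1 : List β) (acc2 : List γ), List.Forall₂ R acc1 acc2 →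
      List.Forall₂ R (l.foldl f acc1) (l.foldl g acc2) := by
  intro l
  induction l with
  | nil => intro acc1 acc2 hr; exact hr
  | cons x xs ih => intro acc1 acc2 hr; exact ih _ _ (h _ _ _ hr)

lemma forall2_append {α β : Type} (R : α → β → Prop) (a c : List α) (b d : List β)
    (h1 : List.Forall₂ R a b) (h2 : List.Forall₂ R c d) : List.Forall₂ R (a ++ c) (b ++ d) := by
  induction h1 with
  | nil => exact h2
  | cons h _ ih => exact List.Forall₂.cons h ih

lemma dir_step (zone land : List (List Int)) (cur n i j nrA ncA nr nc : Int)
    (hr : nrA = nr) (hc : ncA = nc)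
    (hb : ∀ r c : Int, 0 ≤ cellGet zone r c ∧ cellGet zone r c < cur)
    (acc1 : List (Int × Int × Int × Int × Int)) (acc2 : List (Int × Int × Int))
    (h : List.Forall₂ (ERel zone cur) acc1 acc2) :
    List.Forall₂ (ERel zone cur)
      (if 0 ≤ nrA ∧ nrA < n ∧ 0 ≤ ncA ∧ ncA < n ∧ cellGet zone i j ≠ cellGet zone nrA ncA then
        acc1 ++ [((PySem.List.pyGetD (PySem.List.sorted2 [(nrA, ncA), (i, j)] Prod.fst Prod.snd false) 0 (0, 0)).1,
          (PySem.List.pyGetD (PySem.List.sorted2 [(nrA, ncA), (i, j)] Prod.fst Prod.snd false) 0 (0, 0)).2,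
          (PySem.List.pyGetD (PySem.List.sorted2 [(nrA, ncA), (i, j)] Prod.fst Prod.snd false) 1 (0, 0)).1,
          (PySem.List.pyGetD (PySem.List.sorted2 [(nrA, ncA), (i, j)] Prod.fst Prod.snd false) 1 (0, 0)).2,
          |cellGet land i j - cellGet land nrA ncA|)]
      else acc1)
      (if 0 ≤ nr ∧ nr < n ∧ 0 ≤ nc ∧ nc < n ∧ cellGet zone i j ≠ cellGet zone nr nc then
        acc2 ++ [(|cellGet land i j - cellGet land nr nc|, cellGet zone i j, cellGet zone nr nc)]
      else acc2) := by
  subst hr hc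
  split_ifs with hcond
  · refine forall2_append _ _ _ _ _ h (List.Forall₂.cons ?_ List.Forall₂.nil)
    rcases sorted2_pair (nrA, ncA) (i, j) with hs | hs <;> rw [hs]
    · exact ⟨rfl, Or.inr ⟨rfl, rfl⟩, (hb i j).1, (hb i j).2, (hb nrA ncA).1, (hb nrA ncA).2⟩
    · exact ⟨rfl, Or.inl ⟨rfl, rfl⟩, (hb i j).1, (hb i j).2, (hb nrA ncA).1, (hb nrA ncA).2⟩
  · exact h

lemma edges_rel (land zone : List (List Int)) (cur n : Int)
    (hb : ∀ r c : Int, 0 ≤ cellGet zone r c ∧ cellGet zone r c < cur)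
    (rows cols : List Int) :
    List.Forall₂ (ERel zone cur)
      (rows.foldl (fun es i =>
        cols.foldl (fun es j =>
          dirsA.foldl (fun (es : List (Int × Int × Int × Int × Int)) d =>
            let nr := i + d.1
            let nc := j + d.2
            if 0 ≤ nr ∧ nr < n ∧ 0 ≤ nc ∧ nc < n ∧ cellGet zone i j ≠ cellGet zone nr nc then
              let points := PySem.List.sorted2 [(nr, nc), (i, j)] Prod.fst Prod.snd false
              let q0 := PySem.List.pyGetD points 0 (0, 0)
              let q1 := PySem.List.pyGetD points 1 (0, 0)
              es ++ [(q0.1, q0.2, q1.1, q1.2, |cellGet land i j - cellGet land nr nc|)]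
            else es) es) es) [])
      (rows.foldl (fun es i =>
        cols.foldl (fun es j =>
          (nbrsB i j).foldl (fun (es : List (Int × Int × Int)) q =>
            if 0 ≤ q.1 ∧ q.1 < n ∧ 0 ≤ q.2 ∧ q.2 < n ∧ cellGet zone i j ≠ cellGet zone q.1 q.2 then
              es ++ [(|cellGet land i j - cellGet land q.1 q.2|, cellGet zone i j, cellGet zone q.1 q.2)]
            else es) es) es) []) := by
  apply foldl2_rel
  · intro acc1 acc2 i h
    apply foldl2_rel
    · intro acc1 acc2 j h
      simp only [dirsA, nbrsB, List.foldl]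
      exact dir_step zone land cur n i j (i + (-1)) (j + 0) (i - 1) j (by ring) (by ring) hb _ _
        (dir_step zone land cur n i j (i + 1) (j + 0) (i + 1) j (by ring) (by ring) hb _ _
          (dir_step zone land cur n i j (i + 0) (j + (-1)) i (j - 1) (by ring) (by ring) hb _ _
            (dir_step zone land cur n i j (i + 0) (j + 1) i (j + 1) (by ring) (by ring) hb _ _ h)))
    · exact h
  · exact List.Forall₂.nil

lemma foldl2_rel2 {β γ : Type} {R : β → γ → Prop}
    (f : List β → β → List β) (g : List γ → γ → List γ)
    (hstep : ∀ a1 a2 x y, R x y → List.Forall₂ R a1 a2 → List.Forall₂ R (f a1 x) (g a2 y)) :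
    ∀ (l1 : List β) (l2 : List γ), List.Forall₂ R l1 l2 →
      ∀ (acc1 : List β) (acc2 : List γ), List.Forall₂ R acc1 acc2 →
        List.Forall₂ R (l1.foldl f acc1) (l2.foldl g acc2) := by
  intro l1 l2 hl
  induction hl with
  | nil => intro acc1 acc2 h; exact h
  | cons hxy _ ih => intro acc1 acc2 h; exact ih _ _ (hstep _ _ _ _ hxy h)

lemma insert_rel (zone : List (List Int)) (cur : Int)
    (x : Int × Int × Int × Int × Int) (y : Int × Int × Int) (hxy : ERel zone cur x y) :
    ∀ (a1 : List (Int × Int × Int × Int × Int)) (a2 : List (Int × Int × Int)),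
      List.Forall₂ (ERel zone cur) a1 a2 →
      List.Forall₂ (ERel zone cur)
        (PySem.List.insertBy (fun a b => decide (a.2.2.2.2 < b.2.2.2.2)) x a1)
        (PySem.List.insertBy (fun a b => decide (a.1 < b.1)) y a2) := by
  intro a1 a2 h
  induction h with
  | nil => exact List.Forall₂.cons hxy List.Forall₂.nil
  | @cons u v t1 t2 huv _ ih =>
    simp only [PySem.List.insertBy, decide_eq_true_eq]
    have hk : x.2.2.2.2 = y.1 := hxy.1.symm
    have hk2 : u.2.2.2.2 = v.1 := huv.1.symm
    split_ifs with h1 h2 h2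
    · exact List.Forall₂.cons hxy (List.Forall₂.cons huv (by assumption))
    · rw [hk, hk2] at h1; exact absurd h1 h2
    · rw [hk, hk2] at h1; exact absurd h2 h1
    · exact List.Forall₂.cons huv ih

lemma sort_rel (zone : List (List Int)) (cur : Int)
    (l1 : List (Int × Int × Int × Int × Int)) (l2 : List (Int × Int × Int))
    (h : List.Forall₂ (ERel zone cur) l1 l2) :
    List.Forall₂ (ERel zone cur)
      (PySem.List.sorted l1 (fun e => e.2.2.2.2) false)
      (PySem.List.sorted l2 (fun e => e.1) false) := by
  rw [PySem.List.sorted_eq_foldl_insertBy, PySem.List.sorted_eq_foldl_insertBy]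
  exact foldl2_rel2 _ _ (fun a1 a2 x y hxy hr => insert_rel zone cur x y hxy a1 a2 hr)
    l1 l2 h [] [] List.Forall₂.nil

lemma collapse_iff (x y u v : Int) (_huv : u ≠ v) :
    (if x = max u v then min u v else x) = (if y = max u v then min u v else y) ↔
      (x = y ∨ ((x = u ∨ x = v) ∧ (y = u ∨ y = v))) := by
  rcases le_total u v with h | h
  · rw [max_eq_right h, min_eq_left h]; split_ifs <;> omega
  · rw [max_eq_left h, min_eq_right h]; split_ifs <;> omega

lemma relabel_iff (x y la lb : Int) (_h : la ≠ lb) :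
    (if x = la then lb else x) = (if y = la then lb else y) ↔
      (x = y ∨ ((x = la ∨ x = lb) ∧ (y = la ∨ y = lb))) := by
  split_ifs <;> omega

lemma getD_map (L : List Int) (f : Int → Int) (y : Int) (hy0 : 0 ≤ y) (hyl : y < L.length) :
    PySem.List.pyGetD (L.map f) y 0 = f (PySem.List.pyGetD L y 0) := by
  obtain ⟨n, rfl⟩ : ∃ n : Nat, y = (n : Int) := ⟨y.toNat, (Int.toNat_of_nonneg hy0).symm⟩
  have hn : n < L.length := by exact_mod_cast hyl
  simp [PySem.List.pyGetD_natCast, List.getElem?_eq_getElem hn]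

def Sim (len : Int) (stA stB : List Int × Int) : Prop :=
  stA.2 = stB.2 ∧ (stA.1.length : Int) = len ∧ stB.1.length = stA.1.length ∧ WFp stA.1 ∧
  ∀ a b : Int, 0 ≤ a → a < len → 0 ≤ b → b < len →
    (Root stA.1 a = Root stA.1 b ↔ PySem.List.pyGetD stB.1 a 0 = PySem.List.pyGetD stB.1 b 0)

lemma step_sim (zone : List (List Int)) (len : Int) (stA stB : List Int × Int)
    (hs : Sim len stA stB) (e : Int × Int × Int × Int × Int) (t : Int × Int × Int)
    (he : ERel zone len e t) :
    Sim len
      ((fun (st : List Int × Int) e =>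
        let az := cellGet zone e.1 e.2.1
        let bz := cellGet zone e.2.2.1 e.2.2.2.1
        let fa := findA (st.1.length + 1) st.1 az
        let fb := findA (fa.1.length + 1) fa.1 bz
        if fa.2 ≠ fb.2 then (unionA (fb.1.length + 1) fb.1 az bz, st.2 + e.2.2.2.2)
        else (fb.1, st.2)) stA e)
      ((fun (st : List Int × Int) (e : Int × Int × Int) =>
        let la := PySem.List.pyGetD st.1 e.2.1 0
        let lb := PySem.List.pyGetD st.1 e.2.2 0
        if la ≠ lb then (st.1.map (fun v => if v = la then lb else v), st.2 + e.1)
        else st) stB t) := by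
  obtain ⟨hans, hlenA, hlenB, hwfA, hiff⟩ := hs
  obtain ⟨hcost, hpair, ht10, ht1l, ht20, ht2l⟩ := he
  dsimp only
  set az := cellGet zone e.1 e.2.1 with haz
  set bz := cellGet zone e.2.2.1 e.2.2.2.1 with hbz
  have haz0 : 0 ≤ az := by rcases hpair with ⟨h1, _⟩ | ⟨h1, _⟩ <;> rw [h1] <;> assumption
  have hazl : az < len := by rcases hpair with ⟨h1, _⟩ | ⟨h1, _⟩ <;> rw [h1] <;> assumption
  have hbz0 : 0 ≤ bz := by rcases hpair with ⟨_, h2⟩ | ⟨_, h2⟩ <;> rw [h2] <;> assumption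
  have hbzl : bz < len := by rcases hpair with ⟨_, h2⟩ | ⟨_, h2⟩ <;> rw [h2] <;> assumption
  have hazA : az < stA.1.length := by omega
  have hbzA : bz < stA.1.length := by omega
  have hfa := findA_spec stA.1 hwfA az.toNat az haz0 hazA le_rfl (stA.1.length + 1) (by omega)
  set fa := findA (stA.1.length + 1) stA.1 az with hfadef
  have hbzfa : bz < fa.1.length := by rw [hfa.len]; exact hbzA
  have hfb := findA_spec fa.1 hfa.wf bz.toNat bz hbz0 hbzfa le_rfl (fa.1.length + 1) (by omega)
  set fb := findA (fa.1.length + 1) fa.1 bz with hfbdef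
  have hlenfb : fb.1.length = stA.1.length := by rw [hfb.len, hfa.len]
  have hrootsfb : ∀ y : Int, 0 ≤ y → y < stA.1.length → Root fb.1 y = Root stA.1 y := by
    intro y hy0 hyl
    rw [hfb.roots y hy0 (by rw [hfa.len]; exact hyl), hfa.roots y hy0 hyl]
  have hfa2 : fa.2 = Root stA.1 az := hfa.root
  have hfb2 : fb.2 = Root stA.1 bz := by rw [hfb.root, hfa.roots bz hbz0 hbzA]
  set la := PySem.List.pyGetD stB.1 t.2.1 0 with hla
  set lb := PySem.List.pyGetD stB.1 t.2.2 0 with hlb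
  have hlencast : (stA.1.length : Int) = len := hlenA
  have hbase : ∀ a b : Int, 0 ≤ a → a < len → 0 ≤ b → b < len →
      (Root stA.1 a = Root stA.1 b ↔ PySem.List.pyGetD stB.1 a 0 = PySem.List.pyGetD stB.1 b 0) := hiff
  -- the two guards are equivalent
  have hLpair : (PySem.List.pyGetD stB.1 az 0 = la ∧ PySem.List.pyGetD stB.1 bz 0 = lb) ∨
      (PySem.List.pyGetD stB.1 az 0 = lb ∧ PySem.List.pyGetD stB.1 bz 0 = la) := by
    rcases hpair with ⟨h1, h2⟩ | ⟨h1, h2⟩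
    · exact Or.inl ⟨by rw [h1], by rw [h2]⟩
    · exact Or.inr ⟨by rw [h1], by rw [h2]⟩
  have hset : ∀ x : Int,
      (x = PySem.List.pyGetD stB.1 az 0 ∨ x = PySem.List.pyGetD stB.1 bz 0) ↔ (x = la ∨ x = lb) := by
    intro x
    rcases hLpair with ⟨u, v⟩ | ⟨u, v⟩
    · rw [u, v]
    · rw [u, v]; exact or_comm
  have hguard : Root stA.1 az = Root stA.1 bz ↔ la = lb := by
    rcases hpair with ⟨h1, h2⟩ | ⟨h1, h2⟩
    · rw [hbase az bz haz0 hazl hbz0 hbzl, h1, h2]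
    · rw [hbase az bz haz0 hazl hbz0 hbzl, h1, h2]
      exact ⟨fun h => h.symm, fun h => h.symm⟩
  by_cases hc : Root stA.1 az = Root stA.1 bz
  · -- skip on both sides
    have hla_lb : la = lb := hguard.mp hc
    rw [if_neg (by rw [hfa2, hfb2]; simp [hc]), if_neg (by simp [hla_lb])]
    refine ⟨hans, by simp only [hlenfb]; exact hlencast, by simp only [hlenfb, hlenB], hfb.wf, ?_⟩
    intro a b ha0 hal hb0 hbl
    rw [hrootsfb a ha0 (by omega), hrootsfb b hb0 (by omega)]
    exact hbase a b ha0 hal hb0 hbl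
  · -- merge on both sides
    have hla_lb : la ≠ lb := fun h => hc (hguard.mpr h)
    have hcfb : Root fb.1 az ≠ Root fb.1 bz := by
      rw [hrootsfb az haz0 hazA, hrootsfb bz hbz0 hbzA]; exact hc
    have huni := unionA_spec fb.1 hfb.wf az bz haz0 (by omega) hbz0 (by omega) hcfb
      (fb.1.length + 1) (by omega)
    rw [if_pos (by rw [hfa2, hfb2]; exact hc), if_pos hla_lb]
    refine ⟨by dsimp only; rw [hans, hcost], ?_, ?_, huni.2.1, ?_⟩
    · rw [← hlencast]; exact_mod_cast congrArg Nat.cast (huni.1.trans hlenfb)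
    · rw [List.length_map, huni.1, hlenfb, hlenB]
    · intro a b ha0 hal hb0 hbl
      have haA : a < stA.1.length := by omega
      have hbA : b < stA.1.length := by omega
      have hafb : a < fb.1.length := by omega
      have hbfb : b < fb.1.length := by omega
      rw [huni.2.2 a ha0 hafb, huni.2.2 b hb0 hbfb]
      rw [hrootsfb a ha0 haA, hrootsfb b hb0 hbA,
          hrootsfb az haz0 hazA, hrootsfb bz hbz0 hbzA]
      have hBa : a < stB.1.length := by omega
      have hBb : b < stB.1.length := by omega
      rw [getD_map stB.1 _ a ha0 hBa, getD_map stB.1 _ b hb0 hBb]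
      rw [collapse_iff _ _ _ _ hc, relabel_iff _ _ _ _ hla_lb]
      have hA : ∀ x : Int, 0 ≤ x → x < len →
          ((Root stA.1 x = Root stA.1 az ∨ Root stA.1 x = Root stA.1 bz) ↔
            (PySem.List.pyGetD stB.1 x 0 = la ∨ PySem.List.pyGetD stB.1 x 0 = lb)) := by
        intro x hx0 hxl
        rw [← hset (PySem.List.pyGetD stB.1 x 0)]
        exact or_congr (hbase x az hx0 hxl haz0 hazl) (hbase x bz hx0 hxl hbz0 hbzl)
      exact or_congr (hbase a b ha0 hal hb0 hbl) (and_congr (hA a ha0 hal) (hA b hb0 hbl))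

lemma loop_sim (zone : List (List Int)) (len : Int) :
    ∀ (ea : List (Int × Int × Int × Int × Int)) (eb : List (Int × Int × Int))
      (stA stB : List Int × Int), List.Forall₂ (ERel zone len) ea eb → Sim len stA stB →
      Sim len
        (ea.foldl (fun (st : List Int × Int) e =>
          let az := cellGet zone e.1 e.2.1
          let bz := cellGet zone e.2.2.1 e.2.2.2.1
          let fa := findA (st.1.length + 1) st.1 az
          let fb := findA (fa.1.length + 1) fa.1 bz
          if fa.2 ≠ fb.2 then (unionA (fb.1.length + 1) fb.1 az bz, st.2 + e.2.2.2.2)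
          else (fb.1, st.2)) stA)
        (eb.foldl (fun (st : List Int × Int) (e : Int × Int × Int) =>
          let la := PySem.List.pyGetD st.1 e.2.1 0
          let lb := PySem.List.pyGetD st.1 e.2.2 0
          if la ≠ lb then (st.1.map (fun v => if v = la then lb else v), st.2 + e.1)
          else st) stB) := by
  intro ea eb stA stB hrel
  induction hrel generalizing stA stB with
  | nil => intro hs; exact hs
  | cons hre _ ih =>
    intro hs
    simp only [List.foldl_cons]
    exact ih _ _ (step_sim zone len stA stB hs _ _ hre)


lemma getD_range (cur x : Int) (hx0 : 0 ≤ x) (hxl : x < cur) :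
    PySem.List.pyGetD (PySem.List.pyRange 0 cur 1) x 0 = x := by
  obtain ⟨n, rfl⟩ : ∃ n : Nat, x = (n : Int) := ⟨x.toNat, (Int.toNat_of_nonneg hx0).symm⟩
  have hn : n < (PySem.List.pyRange 0 cur 1).length := by
    rw [PySem.List.length_pyRange_one]; omega
  rw [PySem.List.pyGetD_natCast, List.getD_eq_getElem _ _ hn, PySem.List.getElem_pyRange_one]
  omega

lemma length_range_cast (cur : Int) (hcur : 1 ≤ cur) :
    ((PySem.List.pyRange 0 cur 1).length : Int) = cur := by
  rw [PySem.List.length_pyRange_one]; omega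

lemma init_sim (cur : Int) (hcur : 1 ≤ cur) :
    Sim cur ((PySem.List.pyRange 0 cur 1).map (fun i => i), 0) (PySem.List.pyRange 0 cur 1, 0) := by
  rw [List.map_id']
  have hlen := length_range_cast cur hcur
  have hfix : ∀ x : Int, 0 ≤ x → x < cur → PySem.List.pyGetD (PySem.List.pyRange 0 cur 1) x 0 = x :=
    fun x h1 h2 => getD_range cur x h1 h2
  unfold Sim WFp
  dsimp only
  refine ⟨rfl, hlen, rfl, ?_, ?_⟩
  · intro x hx0 hxl
    rw [hfix x hx0 (by omega)]
    omega
  · intro a b ha0 hal hb0 hbl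
    rw [Root_of_fix _ a (hfix a ha0 hal), Root_of_fix _ b (hfix b hb0 hbl),
        hfix a ha0 hal, hfix b hb0 hbl]

lemma zone0_eq (n : Int) :
    (PySem.List.pyRange 0 n 1).map (fun _ => (PySem.List.pyRange 0 n 1).map (fun _ => (0 : Int)))
      = (PySem.List.pyRange 0 n 1).map (fun _ => PySem.List.pyRepeat [(0 : Int)] n) := by
  apply List.map_congr_left
  intro _ _
  rw [PySem.List.pyRepeat_singleton, List.map_const', PySem.List.length_pyRange_one]
  congr 1
  omega

lemma zone0_bound (n : Int) :
    ZBound ((PySem.List.pyRange 0 n 1).map (fun _ => PySem.List.pyRepeat [(0 : Int)] n)) 1 := by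
  intro row hrow v hv
  simp only [List.mem_map] at hrow
  obtain ⟨_, _, rfl⟩ := hrow
  rw [PySem.List.pyRepeat_singleton] at hv
  rw [List.eq_of_mem_replicate hv]
  omega

-- ===== VERDICT (by name: the statement is the Claim_ definition above) =====
theorem solution_spec : Claim_equal_solution := by
  intro land height hdom hpre
  unfold Spec_solution solution solution_alt
  simp only [← dfs_eq, zone0_eq]
  set zc := List.foldl
      (fun zc i =>
        List.foldl
          (fun (zc : List (List Int) × Int) j =>
            if cellGet zc.1 i j = 0 then
              (dfsA land height zc.2 (land.length * land.length + 1) zc.1 i j, zc.2 + 1)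
            else zc)
          zc (PySem.List.pyRange 0 (land.length : Int) 1))
      ((PySem.List.pyRange 0 (land.length : Int) 1).map
        (fun _ => PySem.List.pyRepeat [(0 : Int)] (land.length : Int)), 1)
      (PySem.List.pyRange 0 (land.length : Int) 1) with hzc
  have hinv : ZBound zc.1 zc.2 ∧ 1 ≤ zc.2 := by
    rw [hzc]
    exact label_invariant land height (PySem.List.pyRange 0 (land.length : Int) 1)
      (PySem.List.pyRange 0 (land.length : Int) 1) _ ⟨zone0_bound (land.length : Int), le_rfl⟩
  have hb : ∀ r c : Int, 0 ≤ cellGet zc.1 r c ∧ cellGet zc.1 r c < zc.2 :=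
    fun r c => cellGet_bound zc.1 zc.2 r c (by omega) hinv.1
  have hrel := sort_rel zc.1 zc.2 _ _
    (edges_rel land zc.1 zc.2 (land.length : Int) hb
      (PySem.List.pyRange 0 (land.length : Int) 1) (PySem.List.pyRange 0 (land.length : Int) 1))
  have hsim := loop_sim zc.1 zc.2 _ _ _ _ hrel (init_sim zc.2 hinv.2)
  exact hsim.1
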